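-- pv_equiv track=rewrite | github.com/Vligai/vlair | src/secops_helper/core/report_generator.py | _md_findings_section
-- ===== SOURCE A (Python) =====
-- from typing import Dict, Any, List, Optional
--
-- def _md_findings_section(findings: List[Dict], finding_counts: Dict[str, int]) -> str:
--     """Build Markdown findings section grouped by severity."""
--     total = len(findings)
--     lines = [f"## Findings ({total})"]
--
--     if not findings:
--         lines.append("\nNo findings to report.")
--         return "\n".join(lines)
--
--     severity_order = ["critical", "high", "medium", "low", "info"]
--     grouped = {}
--     for f in findings:
--         sev = f.get("severity", "info")
--         grouped.setdefault(sev, []).append(f)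
--
--     for sev in severity_order:
--         items = grouped.get(sev, [])
--         if not items:
--             continue
--         count = len(items)
--         lines.append(f"\n### {sev.capitalize()} ({count})\n")
--         for item in items:
--             msg = item.get("message", "")
--             source = item.get("source", "")
--             lines.append(f"- **[{sev.upper()}]** {msg} *(source: {source})*")
--
--     return "\n".join(lines)
-- ===== SOURCE B (Python) =====
-- def _md_findings_section(findings, finding_counts):
--     """Build Markdown findings section by scanning findings once per severity (no intermediate grouping dict)."""
--     header = f"## Findings ({len(findings)})"
--     if not findings:
--         return "\n".join([header, "\nNo findings to report."])
--
--     def section(sev):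
--         items = [f for f in findings if f.get("severity", "info") == sev]
--         if not items:
--             return []
--         return [f"\n### {sev.capitalize()} ({len(items)})\n"] + [
--             f"- **[{sev.upper()}]** {f.get('message', '')} *(source: {f.get('source', '')})*"
--             for f in items
--         ]
--
--     return "\n".join([header] + [line for sev in ("critical", "high", "medium", "low", "info")
--                                  for line in section(sev)])
-- ===== Notes on version B (the rewrite author's own statement) =====
-- stated objective: simpler
-- what changed: B drops A's intermediate severity->items grouping dict: it emits the section for each severity by filtering the findings list directly, one scan per fixed severity, joining header and flattened sections in one expression.
import Mathlib
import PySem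

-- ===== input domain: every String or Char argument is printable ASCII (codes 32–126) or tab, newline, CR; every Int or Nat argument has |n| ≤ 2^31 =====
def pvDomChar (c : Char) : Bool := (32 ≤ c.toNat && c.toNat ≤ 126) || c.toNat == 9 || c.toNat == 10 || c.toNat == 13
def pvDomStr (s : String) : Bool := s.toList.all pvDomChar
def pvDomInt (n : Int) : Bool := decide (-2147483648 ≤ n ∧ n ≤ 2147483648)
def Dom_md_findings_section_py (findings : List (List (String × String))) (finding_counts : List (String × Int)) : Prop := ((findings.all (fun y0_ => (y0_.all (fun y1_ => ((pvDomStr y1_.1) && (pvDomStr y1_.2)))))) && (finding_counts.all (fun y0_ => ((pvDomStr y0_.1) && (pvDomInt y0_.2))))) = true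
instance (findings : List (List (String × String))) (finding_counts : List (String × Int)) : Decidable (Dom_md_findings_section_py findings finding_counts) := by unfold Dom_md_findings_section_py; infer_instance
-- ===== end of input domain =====

-- B drops the intermediate grouping dict and filters the findings per fixed severity instead (objective: simpler).

-- ===== PORT A =====
-- A-side helpers
-- str.capitalize, hand-ported (exact on the ASCII domain): first char uppercased, rest lowercased
def pvCapA (s : String) : String :=
  match s.toList with
  | [] => ""
  | c :: rest => String.ofList (PySem.Chars.upperChar c :: PySem.Chars.lower rest)

def pvSevOfA (f : List (String × String)) : String :=
  (PySem.Dict.ofList f).getD "severity" "info"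

def md_findings_section_py (findings : List (List (String × String))) (finding_counts : List (String × Int)) : String :=
  let total : Int := findings.length
  let lines : List String := ["## Findings (" ++ PySem.Int.toStr total ++ ")"]
  if findings.isEmpty then
    PySem.Str.join "\n" (lines ++ ["\nNo findings to report."])
  else
    let severity_order : List String := ["critical", "high", "medium", "low", "info"]
    -- grouped.setdefault(sev, []).append(f)  ==  grouped[sev] = grouped.get(sev, []) + [f]
    let grouped : PySem.Dict String (List (List (String × String))) :=
      findings.foldl (fun d f => d.modify (pvSevOfA f) [] (· ++ [f])) PySem.Dict.empty
    let lines := severity_order.foldl (fun ls sev =>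
      let items := grouped.getD sev []
      if items.isEmpty then ls
      else
        let count : Int := items.length
        items.foldl (fun ls2 item =>
            ls2 ++ ["- **[" ++ PySem.Str.upper sev ++ "]** " ++
                    (PySem.Dict.ofList item).getD "message" "" ++ " *(source: " ++
                    (PySem.Dict.ofList item).getD "source" "" ++ ")*"])
          (ls ++ ["\n### " ++ pvCapA sev ++ " (" ++ PySem.Int.toStr count ++ ")\n"])) lines
    PySem.Str.join "\n" lines

-- ===== PORT B =====
-- B-side helpers
def pvCapB (s : String) : String :=
  match s.toList with
  | [] => ""
  | c :: rest => String.ofList (PySem.Chars.upperChar c :: PySem.Chars.lower rest)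

def pvSevOfB (f : List (String × String)) : String :=
  (PySem.Dict.ofList f).getD "severity" "info"

def pvLineB (sev : String) (f : List (String × String)) : String :=
  "- **[" ++ PySem.Str.upper sev ++ "]** " ++
  (PySem.Dict.ofList f).getD "message" "" ++ " *(source: " ++
  (PySem.Dict.ofList f).getD "source" "" ++ ")*"

def pvSectionB (findings : List (List (String × String))) (sev : String) : List String :=
  let items := findings.filter (fun f => pvSevOfB f == sev)
  if items.isEmpty then []
  else ("\n### " ++ pvCapB sev ++ " (" ++ PySem.Int.toStr (items.length : Int) ++ ")\n")
       :: items.map (pvLineB sev)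

def md_findings_section_py_alt (findings : List (List (String × String))) (finding_counts : List (String × Int)) : String :=
  let header := "## Findings (" ++ PySem.Int.toStr (findings.length : Int) ++ ")"
  if findings.isEmpty then
    PySem.Str.join "\n" [header, "\nNo findings to report."]
  else
    PySem.Str.join "\n" (header ::
      (["critical", "high", "medium", "low", "info"].flatMap (pvSectionB findings)))

-- ===== PRECONDITION & SPEC =====
def Spec_md_findings_section_py (findings : List (List (String × String))) (finding_counts : List (String × Int)) (out : String) : Prop := out = md_findings_section_py_alt findings finding_counts
instance (findings : List (List (String × String))) (finding_counts : List (String × Int)) (out : String) : Decidable (Spec_md_findings_section_py findings finding_counts out) := by unfold Spec_md_findings_section_py; infer_instance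

-- ===== CLAIM (what is proved, stated in full; the proofs are below) =====
def Claim_equal_md_findings_section_py : Prop := ∀ (findings : List (List (String × String))) (finding_counts : List (String × Int)), Dom_md_findings_section_py findings finding_counts → Spec_md_findings_section_py findings finding_counts (md_findings_section_py findings finding_counts)

-- ===== LEMMAS AND PROOFS =====

-- a foldl whose step appends a block (pointwise) is init ++ flatMap
theorem pv_foldl_step {α β : Type} (step : List α → β → List α) (g : β → List α)
    (hstep : ∀ ls x, step ls x = ls ++ g x) :
    ∀ (l : List β) (init : List α), l.foldl step init = init ++ l.flatMap g := by
  intro l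
  induction l with
  | nil => intro init; simp
  | cons x xs ih => intro init; simp [List.foldl_cons, hstep, ih]

-- a foldl whose step appends a block is a flatMap
theorem pv_foldl_flatMap {α β : Type} (g : β → List α) :
    ∀ (l : List β) (init : List α),
      l.foldl (fun acc x => acc ++ g x) init = init ++ l.flatMap g := by
  intro l
  induction l with
  | nil => intro init; simp
  | cons x xs ih => intro init; simp [List.foldl_cons, ih]

theorem pv_flatMap_single {α β : Type} (f : α → β) :
    ∀ l : List α, l.flatMap (fun x => [f x]) = l.map f := by
  intro l; induction l with
  | nil => rfl
  | cons x xs ih => simp [List.flatMap_cons, ih]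

-- A's grouping dict looked up at sev is exactly the filter B computes
theorem pv_grouped_getD (findings : List (List (String × String))) (sev : String) :
    (findings.foldl (fun d f => d.modify (pvSevOfA f) [] (· ++ [f])) PySem.Dict.empty).getD sev []
      = findings.filter (fun f => pvSevOfA f == sev) := by
  have h := PySem.Dict.getD_foldl_modify_append
    (l := findings.map (fun f => (pvSevOfA f, f))) (d := PySem.Dict.empty) (c := sev)
  rw [List.foldl_map] at h
  simpa [List.filter_map, Function.comp_def] using h

-- A's per-severity step equals appending B's section
theorem pv_stepA_eq (findings : List (List (String × String))) (ls : List String) (sev : String) :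
    (let items := (findings.foldl (fun d f => d.modify (pvSevOfA f) [] (· ++ [f])) PySem.Dict.empty).getD sev []
     if items.isEmpty then ls
     else
       let count : Int := items.length
       items.foldl (fun ls2 item =>
           ls2 ++ ["- **[" ++ PySem.Str.upper sev ++ "]** " ++
                   (PySem.Dict.ofList item).getD "message" "" ++ " *(source: " ++
                   (PySem.Dict.ofList item).getD "source" "" ++ ")*"])
         (ls ++ ["\n### " ++ pvCapA sev ++ " (" ++ PySem.Int.toStr count ++ ")\n"]))
      = ls ++ pvSectionB findings sev := by
  rw [pv_grouped_getD]
  unfold pvSectionB pvSevOfB pvLineB pvCapB pvSevOfA pvCapA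
  by_cases h : (findings.filter (fun f => (PySem.Dict.ofList f).getD "severity" "info" == sev)).isEmpty
  · simp only [h, if_pos]
    simp
  · simp only [h, if_neg, Bool.false_eq_true, not_false_eq_true]
    rw [pv_foldl_flatMap]
    rw [pv_flatMap_single]
    simp

-- ===== VERDICT (by name: the statement is the Claim_ definition above) =====
theorem md_findings_section_py_spec : Claim_equal_md_findings_section_py := by
  intro findings finding_counts _
  unfold Spec_md_findings_section_py md_findings_section_py md_findings_section_py_alt
  by_cases hemp : findings.isEmpty
  · simp [hemp]
  · simp only [hemp, if_neg, Bool.false_eq_true, not_false_eq_true]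
    rw [pv_foldl_step _ (pvSectionB findings) (pv_stepA_eq findings)]
    rfl
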